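-- pv_equiv track=rewrite | github.com/charleshahn85/lab5 | lab5.py | ip_convert
-- ===== SOURCE A (Python) =====
-- def is_valid_part(part):
--     if not part.isdigit() or (len(part) > 1 and part[0] == '0'):
--         return False
--     num = int(part)
--     return 0 <= num <= 255
--
-- def is_valid_ip(ip):
--     parts = ip.split('.')
--     if len(parts) != 4:
--         return False
--     return all(is_valid_part(part) for part in parts)
--
-- def decimal_to_binary(n):
--     if n == 0:
--         return "0"
--     elif n == 1:
--         return "1"
--     else:
--         return decimal_to_binary(n // 2) + str(n % 2)
--
-- def binary_to_decimal(b):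
--     if not b:
--         return 0
--     return int(b[-1]) + 2 * binary_to_decimal(b[:-1])
--
-- def ip_to_binary(ip):
--     if not is_valid_ip(ip):
--         return "Invalid IP address"
--
--     parts = ip.split('.')
--     binary_parts = [decimal_to_binary(int(part)).zfill(8) for part in parts]
--     return ".".join(binary_parts)
--
-- def ip_convert(ip_or_binary):
--     if '.' in ip_or_binary:
--         # Assume it's an IP address
--         if is_valid_ip(ip_or_binary):
--             return ip_to_binary(ip_or_binary)
--         else:
--             return "Invalid IP address"
--     else:
--         # Assume it's a binary representation
--         if len(ip_or_binary) == 32 and all(bit in '01' for bit in ip_or_binary):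
--             parts = [ip_or_binary[i:i+8] for i in range(0, 32, 8)]
--             decimal_parts = [str(binary_to_decimal(part)) for part in parts]
--             return ".".join(decimal_parts)
--         else:
--             return "Invalid binary representation"
-- ===== SOURCE B (Python) =====
-- def ip_convert(ip_or_binary):
--     if '.' in ip_or_binary:
--         parts = ip_or_binary.split('.')
--         if len(parts) == 4 and all(
--             p.isdigit()
--             and not (len(p) > 1 and p[0] == '0')
--             and 0 <= int(p) <= 255
--             for p in parts
--         ):
--             return '.'.join(format(int(p), '08b') for p in parts)
--         return "Invalid IP address"
--     if len(ip_or_binary) == 32 and all(c in '01' for c in ip_or_binary):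
--         return '.'.join(
--             str(int(ip_or_binary[i:i + 8], 2)) for i in range(0, 32, 8)
--         )
--     return "Invalid binary representation"
-- ===== Notes on version B (the rewrite author's own statement) =====
-- stated objective: idiomatic
-- what changed: Replaced A's recursive per-bit helpers (decimal_to_binary with zfill, right-recursive binary_to_decimal) by closed-form conversions the built-in 8-bit format() call and int(octet, 2), folded the five functions into one flat function, and dropped the double validation (is_valid_ip is evaluated twice in A).
import Mathlib
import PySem

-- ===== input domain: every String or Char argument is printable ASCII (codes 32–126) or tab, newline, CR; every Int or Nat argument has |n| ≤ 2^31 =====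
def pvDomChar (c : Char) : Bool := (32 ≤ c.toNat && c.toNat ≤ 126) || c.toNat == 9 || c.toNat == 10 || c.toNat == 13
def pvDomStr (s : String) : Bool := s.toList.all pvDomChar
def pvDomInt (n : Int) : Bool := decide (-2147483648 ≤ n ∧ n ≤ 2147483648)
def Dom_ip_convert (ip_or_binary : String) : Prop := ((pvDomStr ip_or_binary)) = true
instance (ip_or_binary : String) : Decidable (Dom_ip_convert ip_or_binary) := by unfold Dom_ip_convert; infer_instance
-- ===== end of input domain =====

-- B replaces A's recursive per-bit helpers (decimal_to_binary, binary_to_decimal) with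
-- closed-form conversions (Python's 8-bit format() and int(octet, 2)) in one flat function (objective: idiomatic).

-- ===== PORT A =====

def is_valid_part (part : String) : Bool :=
  if !(PySem.Str.strIsdigit part) ||
      (decide (PySem.Str.len part > 1) && (PySem.Str.pyGet? part 0 == some '0')) then
    false
  else
    -- int(part): isdigit guard makes ofStr? return some here
    let num := (PySem.Int.ofStr? part).getD 0
    decide (0 ≤ num) && decide (num ≤ 255)

def is_valid_ip (ip : String) : Bool :=
  let parts := (PySem.Str.split? ip ".").getD []
  if decide (parts.length ≠ 4) then false
  else parts.all is_valid_part

-- decimal_to_binary, written with a structural fuel parameter (n.toNat + 1 steps always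
-- suffice for n ≥ 0, the only calls; the Python recurses forever for n < 0)
def decimal_to_binary_fuel : Nat → Int → List Char
  | 0, _ => []
  | fuel + 1, n =>
    if n = 0 then ['0']
    else if n = 1 then ['1']
    else decimal_to_binary_fuel fuel (PySem.Int.floordiv n 2) ++ PySem.Int.toChars (PySem.Int.mod n 2)

def decimal_to_binary (n : Int) : List Char := decimal_to_binary_fuel (n.toNat + 1) n

-- int(b[-1]) on a one-char string: c.toNat - 48 is exact on digit chars, the only calls ('01' guard);
-- structural fuel b.length (one char consumed per step) replaces Python's b[:-1] recursion depth
def binary_to_decimal_fuel : Nat → List Char → Int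
  | 0, _ => 0
  | fuel + 1, b =>
    match b with
    | [] => 0
    | c :: cs =>
      ((((c :: cs).getLast (by simp)).toNat : Int) - 48) +
        2 * binary_to_decimal_fuel fuel ((c :: cs).dropLast)

def binary_to_decimal (b : List Char) : Int := binary_to_decimal_fuel b.length b

def ip_to_binary (ip : String) : String :=
  if !is_valid_ip ip then "Invalid IP address"
  else
    let parts := (PySem.Str.split? ip ".").getD []
    let binary_parts :=
      parts.map (fun part => PySem.Chars.zfill (decimal_to_binary ((PySem.Int.ofStr? part).getD 0)) 8)
    String.ofList (PySem.Chars.join ".".toList binary_parts)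

def ip_convert (ip_or_binary : String) : String :=
  if PySem.Str.isIn "." ip_or_binary then
    if is_valid_ip ip_or_binary then ip_to_binary ip_or_binary
    else "Invalid IP address"
  else
    if decide (PySem.Str.len ip_or_binary = 32) &&
        ip_or_binary.toList.all (fun bit => PySem.Chars.isIn [bit] "01".toList) then
      let parts := (PySem.List.pyRange 0 32 8).map
        (fun i => PySem.Chars.slice ip_or_binary.toList (some i) (some (i + 8)))
      let decimal_parts := parts.map (fun part => PySem.Int.toChars (binary_to_decimal part))
      String.ofList (PySem.Chars.join ".".toList decimal_parts)
    else "Invalid binary representation"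

-- ===== PORT B =====

-- format(n, '08b'): exact for 0 ≤ n < 256, the only calls
def pvFmt8 (n : Int) : List Char :=
  (List.range 8).map (fun i => if n.toNat.testBit (7 - i) then '1' else '0')

-- int(s, 2): digit value c.toNat - 48 is exact under the '01' guard, the only calls
def pvInt2 (cs : List Char) : Int :=
  cs.foldl (fun acc c => 2 * acc + ((c.toNat : Int) - 48)) 0

def ip_convert_alt (ip_or_binary : String) : String :=
  if PySem.Str.isIn "." ip_or_binary then
    let parts := (PySem.Str.split? ip_or_binary ".").getD []
    if decide (parts.length = 4) && parts.all (fun p =>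
        PySem.Str.strIsdigit p &&
        !(decide (PySem.Str.len p > 1) && (PySem.Str.pyGet? p 0 == some '0')) &&
        decide (0 ≤ (PySem.Int.ofStr? p).getD 0) && decide ((PySem.Int.ofStr? p).getD 0 ≤ 255)) then
      String.ofList (PySem.Chars.join ".".toList
        (parts.map (fun p => pvFmt8 ((PySem.Int.ofStr? p).getD 0))))
    else "Invalid IP address"
  else
    if decide (PySem.Str.len ip_or_binary = 32) &&
        ip_or_binary.toList.all (fun c => PySem.Chars.isIn [c] "01".toList) then
      String.ofList (PySem.Chars.join ".".toList
        ((PySem.List.pyRange 0 32 8).map (fun i =>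
          PySem.Int.toChars (pvInt2 (PySem.Chars.slice ip_or_binary.toList (some i) (some (i + 8)))))))
    else "Invalid binary representation"

-- ===== PRECONDITION & SPEC =====
def Spec_ip_convert (ip_or_binary : String) (out : String) : Prop := out = ip_convert_alt ip_or_binary
instance (ip_or_binary : String) (out : String) : Decidable (Spec_ip_convert ip_or_binary out) := by unfold Spec_ip_convert; infer_instance

-- ===== CLAIM (what is proved, stated in full; the proofs are below) =====
def Claim_equal_ip_convert : Prop := ∀ (ip_or_binary : String), Dom_ip_convert ip_or_binary → Spec_ip_convert ip_or_binary (ip_convert ip_or_binary)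

-- ===== LEMMAS AND PROOFS =====

-- A's per-part validity check equals B's inlined one
theorem valid_part_eq (p : String) :
    is_valid_part p =
      (PySem.Str.strIsdigit p &&
        !(decide (PySem.Str.len p > 1) && (PySem.Str.pyGet? p 0 == some '0')) &&
        decide (0 ≤ (PySem.Int.ofStr? p).getD 0) && decide ((PySem.Int.ofStr? p).getD 0 ≤ 255)) := by
  unfold is_valid_part
  cases hd : PySem.Str.strIsdigit p <;>
    cases hz : (decide (PySem.Str.len p > 1) && (PySem.Str.pyGet? p 0 == some '0')) <;>
      simp

-- A's bit loop = B's closed form, for 0 ≤ n ≤ 255 (kernel-checked on all 256 values)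
set_option maxRecDepth 8000 in
theorem dec2bin_eq_fmt8_nat : ∀ m : Nat, m < 256 →
    PySem.Chars.zfill (decimal_to_binary (m : Int)) 8 = pvFmt8 (m : Int) := by decide

theorem dec2bin_eq_fmt8 (n : Int) (h0 : 0 ≤ n) (h1 : n ≤ 255) :
    PySem.Chars.zfill (decimal_to_binary n) 8 = pvFmt8 n := by
  have : n = ((n.toNat : Nat) : Int) := by omega
  rw [this]
  exact dec2bin_eq_fmt8_nat n.toNat (by omega)

theorem bin2dec_fuel_concat (l : List Char) (c : Char) (fuel : Nat) (h : l.length ≤ fuel) :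
    binary_to_decimal_fuel (fuel + 1) (l ++ [c]) =
      ((c.toNat : Int) - 48) + 2 * binary_to_decimal_fuel fuel l := by
  rcases l with _ | ⟨x, xs⟩
  · cases fuel <;> rfl
  · rw [List.cons_append, binary_to_decimal_fuel]
    simp
    rw [show x :: (xs ++ [c]) = (x :: xs) ++ [c] from rfl, List.dropLast_concat]

theorem bin2dec_concat (l : List Char) (c : Char) :
    binary_to_decimal (l ++ [c]) = ((c.toNat : Int) - 48) + 2 * binary_to_decimal l := by
  unfold binary_to_decimal
  rw [show (l ++ [c]).length = l.length + 1 by simp]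
  rw [bin2dec_fuel_concat l c l.length le_rfl]

-- A's right-to-left recursion = B's left fold, unconditionally
theorem bin2dec_eq_int2 (b : List Char) : binary_to_decimal b = pvInt2 b := by
  induction b using List.reverseRecOn with
  | nil => rfl
  | append_singleton l c ih =>
    have h2 : pvInt2 (l ++ [c]) = 2 * pvInt2 l + ((c.toNat : Int) - 48) := by
      unfold pvInt2
      rw [List.foldl_append]
      simp only [List.foldl_cons, List.foldl_nil]
    rw [bin2dec_concat, ih, h2]
    ring

-- from a true is_valid_part, the numeric bounds
theorem valid_part_bounds (p : String) (h : is_valid_part p = true) :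
    0 ≤ (PySem.Int.ofStr? p).getD 0 ∧ (PySem.Int.ofStr? p).getD 0 ≤ 255 := by
  rw [valid_part_eq] at h
  simp only [Bool.and_eq_true, decide_eq_true_eq] at h
  exact ⟨h.1.2, h.2⟩

-- ===== VERDICT (by name: the statement is the Claim_ definition above) =====
theorem ip_convert_spec : Claim_equal_ip_convert := by
  unfold Claim_equal_ip_convert
  intro s _
  unfold Spec_ip_convert ip_convert ip_convert_alt
  cases hdot : PySem.Str.isIn "." s
  · -- no '.': binary → decimal branch
    simp only [Bool.false_eq_true, if_false]
    cases hg : (decide (PySem.Str.len s = 32) &&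
        s.toList.all (fun bit => PySem.Chars.isIn [bit] "01".toList))
    · simp
    · simp [bin2dec_eq_int2, Function.comp_def]
  · -- '.' present: IP → binary branch
    simp only [if_true]
    set parts := (PySem.Str.split? s ".").getD [] with hparts
    have hcond : is_valid_ip s =
        (decide (parts.length = 4) && parts.all (fun p =>
          PySem.Str.strIsdigit p &&
          !(decide (PySem.Str.len p > 1) && (PySem.Str.pyGet? p 0 == some '0')) &&
          decide (0 ≤ (PySem.Int.ofStr? p).getD 0) && decide ((PySem.Int.ofStr? p).getD 0 ≤ 255))) := by
      unfold is_valid_ip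
      rw [← hparts, funext valid_part_eq]
      by_cases h4 : parts.length = 4
      · simp [h4]
      · simp [h4]
    rw [← hcond]
    cases hv : is_valid_ip s
    · simp
    · simp only [if_true]
      unfold ip_to_binary
      rw [hv]
      simp only [Bool.not_true, Bool.false_eq_true, if_false, ← hparts]
      have hall : ∀ p ∈ parts, is_valid_part p = true := by
        unfold is_valid_ip at hv
        rw [← hparts] at hv
        by_cases h4 : parts.length = 4
        · simp only [h4] at hv
          simp at hv
          exact hv
        · simp [h4] at hv
      congr 1
      congr 1
      apply List.map_congr_left
      intro p hp
      obtain ⟨hb0, hb1⟩ := valid_part_bounds p (hall p hp)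
      exact dec2bin_eq_fmt8 _ hb0 hb1
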